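-- pv_equiv track=rewrite | github.com/ProjectDrawdown/solutions | tools/summarize_expected_result.py | share_prefixes
-- ===== SOURCE A (Python) =====
-- def share_prefixes(error_list):
--     # Remove the common sheet name out of the error messages, returning a single, combined string.
--     # Note that for key results, they'll just all end up sharing the empty prefix
--     groupby = {}
--     for e in error_list:
--         parts = e.split(" ")
--         errno = parts[-1]
--         prefix = " ".join(parts[:-1])
--         if prefix not in groupby:
--             groupby[prefix] = []
--         groupby[prefix].append(errno)
--     return ";".join( prefix + " " + ",".join( groupby[prefix]) for prefix in groupby.keys())
-- ===== SOURCE B (Python) =====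
-- def share_prefixes(error_list):
--     # Two-pass version: first collect distinct prefixes in first-occurrence order,
--     # then re-scan the list per prefix to gather its errnos.
--     def split_msg(e):
--         parts = e.split(" ")
--         return " ".join(parts[:-1]), parts[-1]
--     prefixes = []
--     for e in error_list:
--         p = split_msg(e)[0]
--         if p not in prefixes:
--             prefixes.append(p)
--     groups = []
--     for p in prefixes:
--         errnos = [split_msg(e)[1] for e in error_list if split_msg(e)[0] == p]
--         groups.append(p + " " + ",".join(errnos))
--     return ";".join(groups)
-- ===== Notes on version B (the rewrite author's own statement) =====
-- stated objective: alternative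
-- what changed: A builds a prefix->errnos dict in one pass and joins its items; B makes two passes with no dict: it first collects the distinct prefixes in first-occurrence order into a list, then rescans error_list once per prefix to gather that prefix's errnos.
import Mathlib
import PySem

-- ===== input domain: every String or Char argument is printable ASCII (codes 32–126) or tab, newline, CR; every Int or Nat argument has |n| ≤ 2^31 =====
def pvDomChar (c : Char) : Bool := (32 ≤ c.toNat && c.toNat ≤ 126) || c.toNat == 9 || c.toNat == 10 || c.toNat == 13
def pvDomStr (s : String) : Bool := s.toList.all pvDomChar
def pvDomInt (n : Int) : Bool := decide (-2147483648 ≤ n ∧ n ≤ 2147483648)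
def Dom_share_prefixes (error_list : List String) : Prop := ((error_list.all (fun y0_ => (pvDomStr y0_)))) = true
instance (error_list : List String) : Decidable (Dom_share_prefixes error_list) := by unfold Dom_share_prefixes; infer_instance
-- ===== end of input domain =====

-- B replaces A's one-pass dict grouping by a two-pass scheme (distinct prefixes first, then one rescan
-- per prefix); objective: alternative decomposition, not speed.

-- ===== PORT A =====
def share_prefixes (error_list : List String) : String :=
  let groupby := error_list.foldl (fun d e =>
      let parts := (PySem.Str.split? e " ").getD []
      -- parts[-1]: splitOn never returns [], so pyGet? is always some; getD "" only totalises
      let errno := (PySem.List.pyGet? parts (-1)).getD ""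
      let pfx := PySem.Str.join " " (PySem.List.slice parts none (some (-1)))
      let d := if d.contains pfx = false then d.insert pfx ([] : List String) else d
      d.insert pfx (d.getD pfx [] ++ [errno]))              -- groupby[prefix].append(errno)
    (PySem.Dict.empty)
  PySem.Str.join ";" (groupby.items.map (fun kv => kv.1 ++ " " ++ PySem.Str.join "," kv.2))

-- ===== PORT B =====
-- helper split_msg of Source B
def pvSplitMsg (e : String) : String × String :=
  let parts := (PySem.Str.split? e " ").getD []
  (PySem.Str.join " " (PySem.List.slice parts none (some (-1))),
   (PySem.List.pyGet? parts (-1)).getD "")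

def share_prefixes_alt (error_list : List String) : String :=
  let prefixes := error_list.foldl (fun acc e =>
      let p := (pvSplitMsg e).1
      if acc.contains p then acc else acc ++ [p]) []
  PySem.Str.join ";" (prefixes.map (fun p =>
      p ++ " " ++ PySem.Str.join ","
        ((error_list.filter (fun e => (pvSplitMsg e).1 == p)).map (fun e => (pvSplitMsg e).2))))

-- ===== PRECONDITION & SPEC =====
def Spec_share_prefixes (error_list : List String) (out : String) : Prop := out = share_prefixes_alt error_list
instance (error_list : List String) (out : String) : Decidable (Spec_share_prefixes error_list out) := by unfold Spec_share_prefixes; infer_instance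

-- ===== CLAIM (what is proved, stated in full; the proofs are below) =====
def Claim_equal_share_prefixes : Prop := ∀ (error_list : List String), Dom_share_prefixes error_list → Spec_share_prefixes error_list (share_prefixes error_list)

-- ===== LEMMAS AND PROOFS =====

-- A's "if key missing insert []; then append" is one Dict.modify
theorem pv_step_eq (d : PySem.Dict String (List String)) (p v : String) :
    (let d1 := if d.contains p = false then d.insert p ([] : List String) else d
     d1.insert p (d1.getD p [] ++ [v])) = d.modify p [] (· ++ [v]) := by
  by_cases h : d.contains p = true
  · simp only [h, PySem.Dict.modify, Bool.true_eq_false, ite_false]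
  · have hf : d.contains p = false := by simpa using h
    simp only [hf, ite_true, PySem.Dict.modify,
      PySem.Dict.getD_insert_self, PySem.Dict.insert_insert_self,
      PySem.Dict.getD_of_not_contains d [] hf, List.nil_append]

theorem pv_main (el : List String) : share_prefixes el = share_prefixes_alt el := by
  unfold share_prefixes share_prefixes_alt
  -- name the mapped pair list
  set l := el.map pvSplitMsg with hl
  -- A's dict is the canonical grouping fold over l
  have hdict : el.foldl (fun d e =>
      let parts := (PySem.Str.split? e " ").getD []
      let errno := (PySem.List.pyGet? parts (-1)).getD ""
      let pfx := PySem.Str.join " " (PySem.List.slice parts none (some (-1)))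
      let d := if d.contains pfx = false then d.insert pfx ([] : List String) else d
      d.insert pfx (d.getD pfx [] ++ [errno])) PySem.Dict.empty
      = l.foldl (fun d q => d.modify q.1 [] (· ++ [q.2])) PySem.Dict.empty := by
    rw [hl, List.foldl_map]
    congr 1
    funext d e
    exact pv_step_eq d (pvSplitMsg e).1 (pvSplitMsg e).2
  rw [hdict]
  set D := l.foldl (fun d q => d.modify q.1 [] (· ++ [q.2])) PySem.Dict.empty with hD
  have hnd : D.keys.Nodup := by
    rw [hD]
    exact PySem.Dict.nodup_keys_foldl_modify_key l (fun q => q.1) []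
      (fun _ q => (· ++ [q.2])) _ PySem.Dict.nodup_keys_empty
  have hkeys : D.keys = PySem.Set.update [] (l.map (fun q => q.1)) := by
    rw [hD]
    rw [PySem.Dict.keys_foldl_modify_key l (fun q => q.1) [] (fun _ q => (· ++ [q.2])),
      PySem.Dict.keys_empty]
  have hgetD : ∀ p, D.getD p [] = (l.filter (fun q => q.1 == p)).map (fun q => q.2) := by
    intro p
    rw [hD, PySem.Dict.getD_foldl_modify_append, PySem.Dict.getD_empty, List.nil_append]
  -- B's first loop builds exactly D.keys
  have hpref : el.foldl (fun acc e =>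
      let p := (pvSplitMsg e).1
      if acc.contains p then acc else acc ++ [p]) []
      = PySem.Set.update [] (l.map (fun q => q.1)) := by
    rw [hl, List.map_map]
    unfold PySem.Set.update
    rw [List.foldl_map]
    rfl
  rw [hpref, ← hkeys]
  dsimp only
  -- items as a map over keys, then pointwise equality of grouped strings
  rw [PySem.Dict.items_eq_map_keys D hnd [], List.map_map]
  apply congrArg
  apply List.map_congr_left
  intro p _
  simp only [Function.comp]
  rw [hgetD p, hl, List.filter_map, List.map_map]
  rfl

-- ===== VERDICT (by name: the statement is the Claim_ definition above) =====
theorem share_prefixes_spec : Claim_equal_share_prefixes := by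
  intro el _
  unfold Spec_share_prefixes
  exact pv_main el
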